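-- pv_equiv track=rewrite | github.com/Y-JaeHyun/algorithmPractice | codility/Lesson8_Leader/Dominator/Dominator.py | solution
-- ===== SOURCE A (Python) =====
-- def solution(A):
--     # write your code in Python 3.6
--     dic = {}
--     half = len(A)/2
--
--     for i in range(len(A)):
--         if A[i] in dic:
--             dic[A[i]] += 1
--         else:
--             dic[A[i]] = 1
--         if dic[A[i]] > half:
--                 return i
--     return -1
-- ===== SOURCE B (Python) =====
-- def solution(A):
--     # Two-pass decomposition: full frequency table, pick the dominator, then locate
--     # the first index where its running count exceeds half.
--     n = len(A)
--     half = n / 2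
--     counts = {}
--     for x in A:
--         counts[x] = counts.get(x, 0) + 1
--     dominator = None
--     for v, c in counts.items():
--         if c > half:
--             dominator = v
--             break
--     if dominator is None:
--         return -1
--     run = 0
--     for i, x in enumerate(A):
--         if x == dominator:
--             run += 1
--             if run > half:
--                 return i
--     return -1
-- ===== Notes on version B (the rewrite author's own statement) =====
-- stated objective: alternative
-- what changed: Splits A's single fused dict-counting pass (which checks '> half' after every increment) into a count-then-locate decomposition: build the full frequency table, pick the value whose total count exceeds len(A)/2, then a second pass tracking only that value's running count to find the first index.
import Mathlib
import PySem

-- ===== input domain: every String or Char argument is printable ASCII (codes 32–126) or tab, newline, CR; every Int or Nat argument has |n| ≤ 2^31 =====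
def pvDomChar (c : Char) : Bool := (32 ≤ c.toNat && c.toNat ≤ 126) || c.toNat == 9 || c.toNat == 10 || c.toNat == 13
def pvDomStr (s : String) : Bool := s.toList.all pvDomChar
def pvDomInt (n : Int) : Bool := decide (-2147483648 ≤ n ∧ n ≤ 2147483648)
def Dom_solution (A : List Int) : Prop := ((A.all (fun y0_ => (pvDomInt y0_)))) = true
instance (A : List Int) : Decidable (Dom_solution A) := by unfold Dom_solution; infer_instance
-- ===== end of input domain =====

-- B replaces A's fused count-and-check pass by a count-then-locate two-pass decomposition (alternative, same cost).
-- The Python float comparison 'c > len(A)/2' is ported exactly as '2*c > len(A)' (n/2 is exact in binary floating point for |n| ≤ 2^31).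


-- ===== PORT A =====
-- the for-loop over range(len(A)) with early return, as structural recursion carrying the dict and the index i
def solutionGo (n : Int) (dic : PySem.Dict Int Int) (i : Int) : List Int → Int
  | [] => -1
  | x :: xs =>
    let dic' := if dic.contains x then dic.insert x (dic.getD x 0 + 1) else dic.insert x 1
    if 2 * dic'.getD x 0 > n then i else solutionGo n dic' (i + 1) xs

def solution (A : List Int) : Int :=
  solutionGo (A.length : Int) PySem.Dict.empty 0 A

-- ===== PORT B =====
-- first loop of Source B: counts[x] = counts.get(x, 0) + 1
def solutionAltCounts (A : List Int) : PySem.Dict Int Int :=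
  A.foldl (fun d x => d.insert x (d.getD x 0 + 1)) PySem.Dict.empty

-- second loop of Source B: first (v, c) in counts.items() with c > half, else None
def solutionAltFind (n : Int) (items : List (Int × Int)) : Option Int :=
  match items with
  | [] => none
  | (v, c) :: rest => if 2 * c > n then some v else solutionAltFind n rest

-- third loop of Source B: running count of the dominator only
def solutionAltLocate (n : Int) (d : Int) (run : Int) (i : Int) (rest : List Int) : Int :=
  match rest with
  | [] => -1
  | x :: xs =>
    if x = d then
      let run' := run + 1
      if 2 * run' > n then i else solutionAltLocate n d run' (i + 1) xs
    else solutionAltLocate n d run (i + 1) xs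

def solution_alt (A : List Int) : Int :=
  let n : Int := A.length
  match solutionAltFind n (solutionAltCounts A).items with
  | none => -1
  | some d => solutionAltLocate n d 0 0 A

-- ===== PRECONDITION & SPEC =====
def Spec_solution (A : List Int) (out : Int) : Prop := out = solution_alt A
instance (A : List Int) (out : Int) : Decidable (Spec_solution A out) := by unfold Spec_solution; infer_instance

-- ===== CLAIM (what is proved, stated in full; the proofs are below) =====
def Claim_equal_solution : Prop := ∀ (A : List Int), Dom_solution A → Spec_solution A (solution A)

-- ===== LEMMAS AND PROOFS =====

-- A's branchy dict update is a counter step: getD after the step is a bumped prefix count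
theorem solutionGo_step_getD (dic : PySem.Dict Int Int) (x y : Int) :
    ((if dic.contains x then dic.insert x (dic.getD x 0 + 1) else dic.insert x 1).getD y 0)
      = if y = x then dic.getD x 0 + 1 else dic.getD y 0 := by
  by_cases hc : dic.contains x
  · simp [hc, PySem.Dict.getD_insert]
  · have hx : dic.getD x 0 = 0 :=
      PySem.Dict.getD_of_not_contains dic 0 (by simpa using hc)
    simp [hc, PySem.Dict.getD_insert, hx]

-- two distinct values cannot both occur more than half the time
theorem count_two_le (x d : Int) (h : x ≠ d) (l : List Int) :
    l.count x + l.count d ≤ l.length := by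
  induction l with
  | nil => simp
  | cons a t ih =>
    simp only [List.count_cons, List.length_cons, beq_iff_eq]
    split_ifs with h1 h2
    · exact absurd (h1.symm.trans h2) h
    all_goals omega

theorem solutionAltFind_none (n : Int) (items : List (Int × Int)) :
    solutionAltFind n items = none ↔ ∀ p ∈ items, ¬ 2 * p.2 > n := by
  induction items with
  | nil => simp [solutionAltFind]
  | cons p rest ih =>
    obtain ⟨v, c⟩ := p
    by_cases h : 2 * c > n
    · simp [solutionAltFind, h]
    · simp [solutionAltFind, h, ih]
      exact fun _ => by omega

theorem solutionAltFind_some (n : Int) (items : List (Int × Int)) (d : Int)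
    (h : solutionAltFind n items = some d) : ∃ c, (d, c) ∈ items ∧ 2 * c > n := by
  induction items with
  | nil => simp [solutionAltFind] at h
  | cons p rest ih =>
    obtain ⟨v, c⟩ := p
    by_cases hc : 2 * c > n
    · simp [solutionAltFind, hc] at h
      exact ⟨c, by simp [h], hc⟩
    · simp [solutionAltFind, hc] at h
      obtain ⟨c', hm, hgt⟩ := ih h
      exact ⟨c', by simp [hm], hgt⟩

-- membership in the counter's items gives the exact total count
theorem counts_items_mem (A : List Int) (d c : Int)
    (h : (d, c) ∈ (solutionAltCounts A).items) : d ∈ A ∧ c = (A.count d : Int) := by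
  have hc : solutionAltCounts A = PySem.Dict.counter A :=
    PySem.Dict.foldl_insert_getD_add_one_eq_counter A
  rw [hc, PySem.Dict.items_counter] at h
  simp only [List.mem_map, Prod.mk.injEq] at h
  obtain ⟨k, hk, hkd, hkc⟩ := h
  subst hkd
  exact ⟨(PySem.Set.mem_ofList _ _).1 hk, hkc.symm⟩

-- every element of A appears in the counter's items with its total count
theorem counts_items_of_mem (A : List Int) (x : Int) (hx : x ∈ A) :
    (x, (A.count x : Int)) ∈ (solutionAltCounts A).items := by
  have hc : solutionAltCounts A = PySem.Dict.counter A :=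
    PySem.Dict.foldl_insert_getD_add_one_eq_counter A
  rw [hc, PySem.Dict.items_counter]
  exact List.mem_map.2 ⟨x, (PySem.Set.mem_ofList _ _).2 hx, rfl⟩

-- no-dominator case: A's loop never fires
theorem solutionGo_none (A : List Int) (n : Int)
    (hall : ∀ x ∈ A, ¬ 2 * (A.count x : Int) > n) :
    ∀ rest pre (dic : PySem.Dict Int Int) (i : Int),
      pre ++ rest = A → (∀ y, dic.getD y 0 = (pre.count y : Int)) →
      solutionGo n dic i rest = -1 := by
  intro rest
  induction rest with
  | nil => intro pre dic i _ _; simp [solutionGo]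
  | cons x xs ih =>
    intro pre dic i hsplit hdic
    have hdic' : ∀ y,
        ((if dic.contains x then dic.insert x (dic.getD x 0 + 1) else dic.insert x 1).getD y 0)
          = (((pre ++ [x]).count y : Nat) : Int) := by
      intro y
      rw [solutionGo_step_getD]
      by_cases hyx : y = x
      · simp [hyx, hdic, List.count_append]
      · simp [hyx, hdic, List.count_append, List.count_singleton]
        exact fun hh => hyx hh.symm
    have hxA : x ∈ A := hsplit ▸ (by simp)
    have hcnt : pre.count x + 1 ≤ A.count x := by
      have : A.count x = pre.count x + (x :: xs).count x := by
        rw [← hsplit, List.count_append]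
      simp at this
      omega
    have hx := hall x hxA
    simp only [solutionGo]
    rw [hdic' x]
    rw [if_neg (by simp [List.count_append]; omega)]
    exact ih (pre ++ [x]) _ (i + 1) (by simpa using hsplit) hdic'

-- dominator case: A's fused loop equals B's locate loop
theorem solutionGo_eq_locate (A : List Int) (n d : Int)
    (hu : ∀ x, x ≠ d → 2 * (A.count x : Int) ≤ n) :
    ∀ rest pre (dic : PySem.Dict Int Int) (i run : Int),
      pre ++ rest = A → (∀ y, dic.getD y 0 = (pre.count y : Int)) →
      run = (pre.count d : Int) →
      solutionGo n dic i rest = solutionAltLocate n d run i rest := by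
  intro rest
  induction rest with
  | nil => intro pre dic i run _ _ _; simp [solutionGo, solutionAltLocate]
  | cons x xs ih =>
    intro pre dic i run hsplit hdic hrun
    have hdic' : ∀ y,
        ((if dic.contains x then dic.insert x (dic.getD x 0 + 1) else dic.insert x 1).getD y 0)
          = (((pre ++ [x]).count y : Nat) : Int) := by
      intro y
      rw [solutionGo_step_getD]
      by_cases hyx : y = x
      · simp [hyx, hdic, List.count_append]
      · simp [hyx, hdic, List.count_append, List.count_singleton]
        exact fun hh => hyx hh.symm
    by_cases hxd : x = d
    · subst hxd
      simp only [solutionGo, solutionAltLocate]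
      rw [hdic' x]
      have hcx : (((pre ++ [x]).count x : Nat) : Int) = run + 1 := by
        simp [List.count_append, hrun]
      rw [hcx]
      by_cases hfire : 2 * (run + 1) > n
      · simp [hfire]
      · rw [if_neg hfire, if_neg hfire]
        exact ih (pre ++ [x]) _ (i + 1) (run + 1) (by simpa using hsplit) hdic'
          (by simp [List.count_append, hrun])
    · have hcnt : pre.count x + 1 ≤ A.count x := by
        have : A.count x = pre.count x + (x :: xs).count x := by
          rw [← hsplit, List.count_append]
        simp at this
        omega
      have hnof : ¬ 2 * (((pre ++ [x]).count x : Nat) : Int) > n := by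
        have := hu x hxd
        simp [List.count_append]
        omega
      simp only [solutionGo, solutionAltLocate, if_neg hxd]
      rw [hdic' x, if_neg hnof]
      exact ih (pre ++ [x]) _ (i + 1) run (by simpa using hsplit) hdic'
        (by simp [List.count_append, hxd, hrun])

theorem solution_eq_alt (A : List Int) : solution A = solution_alt A := by
  unfold solution solution_alt
  cases hfind : solutionAltFind (A.length : Int) (solutionAltCounts A).items with
  | none =>
    have hall : ∀ x ∈ A, ¬ 2 * (A.count x : Int) > (A.length : Int) := by
      intro x hx
      exact (solutionAltFind_none _ _).1 hfind _ (counts_items_of_mem A x hx)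
    simp only [hfind]
    exact solutionGo_none A _ hall A [] PySem.Dict.empty 0 rfl
      (fun y => by simp [PySem.Dict.getD_empty])
  | some d =>
    obtain ⟨c, hmem, hgt⟩ := solutionAltFind_some _ _ _ hfind
    obtain ⟨hdA, hceq⟩ := counts_items_mem A d c hmem
    have hu : ∀ x, x ≠ d → 2 * (A.count x : Int) ≤ (A.length : Int) := by
      intro x hxd
      have hdom : 2 * (A.count d : Int) > (A.length : Int) := hceq ▸ hgt
      have hle : (A.count x : Int) + (A.count d : Int) ≤ (A.length : Int) := by
        exact_mod_cast count_two_le x d hxd A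
      omega
    simp only [hfind]
    exact solutionGo_eq_locate A _ d hu A [] PySem.Dict.empty 0 0 rfl
      (fun y => by simp [PySem.Dict.getD_empty]) (by simp)

-- ===== VERDICT (by name: the statement is the Claim_ definition above) =====
theorem solution_spec : Claim_equal_solution := by
  intro A _
  unfold Spec_solution
  exact solution_eq_alt A
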